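-- pv_equiv track=rewrite | github.com/gwendo/advent-of-code-2017 | 4/problem4.py | is_anagram_password
-- ===== SOURCE A (Python) =====
-- def is_anagram_password(password):
--     words = []
--     password.split(None)
--     for word in password.split(None):
--         sorted_word = "".join(sorted(word))
--         if sorted_word in words:
--             return False
--         else:
--             words.append(sorted_word)
--     return True
-- ===== SOURCE B (Python) =====
-- def _anagrams(a, b):
--     return len(a) == len(b) and all(a.count(c) == b.count(c) for c in a)
--
--
-- def is_anagram_password(password):
--     return _check(password.split(None))
--
--
-- def _check(words):
--     if not words:
--         return True
--     head, rest = words[0], words[1:]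
--     if any(_anagrams(head, w) for w in rest):
--         return False
--     return _check(rest)
-- ===== Notes on version B (the rewrite author's own statement) =====
-- stated objective: alternative
-- what changed: Replaces A's grow-a-list-of-sorted-signatures scan with a recursive pairwise check that compares each word against all later words by a direct character-count anagram test, with no sorting and no seen collection.
import Mathlib
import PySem

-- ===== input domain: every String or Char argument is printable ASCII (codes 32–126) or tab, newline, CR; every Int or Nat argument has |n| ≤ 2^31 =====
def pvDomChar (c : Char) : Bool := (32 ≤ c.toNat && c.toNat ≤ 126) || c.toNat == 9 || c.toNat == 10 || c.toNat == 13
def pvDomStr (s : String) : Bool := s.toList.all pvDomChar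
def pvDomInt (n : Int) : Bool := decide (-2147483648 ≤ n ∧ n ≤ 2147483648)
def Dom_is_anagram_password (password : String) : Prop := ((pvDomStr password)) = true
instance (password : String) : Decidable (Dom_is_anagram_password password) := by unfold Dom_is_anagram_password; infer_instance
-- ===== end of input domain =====

-- B drops A's sorted-signature seen-collection entirely: it recursively compares each word
-- against all later words with a direct character-count anagram test (alternative; same value).

-- ===== PORT A =====
-- '"".join(sorted(word))': joining single characters with "" is exactly the sorted char list.
def pvCanon (w : String) : List Char := PySem.List.sorted w.toList (fun c => c) false

-- the loop 'for word in …: if sorted_word in words: return False else: words.append(sorted_word)'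
def pvGoA : List String → List (List Char) → Bool
  | [], _words => true
  | word :: rest, words =>
    let sorted_word := pvCanon word
    if sorted_word ∈ words then false
    else pvGoA rest (words ++ [sorted_word])

def is_anagram_password (password : String) : Bool :=
  pvGoA (PySem.Str.split₀ password) []

-- ===== PORT B =====
-- '_anagrams(a, b)': 'len(a) == len(b) and all(a.count(c) == b.count(c) for c in a)';
-- iterating a string yields its characters, 'a.count(c)' for a 1-char c is Chars.count a.toList [c].
def pvAnagrams (a b : String) : Bool :=
  (PySem.Str.len a == PySem.Str.len b) &&
    a.toList.all (fun c => PySem.Chars.count a.toList [c] == PySem.Chars.count b.toList [c])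

-- '_check(words)': empty → True; else test head against every later word, recurse on the rest
def pvCheck : List String → Bool
  | [] => true
  | head :: rest =>
    if rest.any (fun w => pvAnagrams head w) then false
    else pvCheck rest

def is_anagram_password_alt (password : String) : Bool :=
  pvCheck (PySem.Str.split₀ password)

-- ===== PRECONDITION & SPEC =====
def Spec_is_anagram_password (password : String) (out : Bool) : Prop := out = is_anagram_password_alt password
instance (password : String) (out : Bool) : Decidable (Spec_is_anagram_password password out) := by unfold Spec_is_anagram_password; infer_instance

-- ===== CLAIM (what is proved, stated in full; the proofs are below) =====
def Claim_equal_is_anagram_password : Prop := ∀ (password : String), Dom_is_anagram_password password → Spec_is_anagram_password password (is_anagram_password password)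

-- ===== LEMMAS AND PROOFS =====

-- counting the 1-character substring [c] is counting the character c
theorem pv_count_go_single (c : Char) (fuel : Nat) : ∀ (l : List Char) (acc : Nat), l.length ≤ fuel →
    PySem.Chars.count.go [c] fuel l acc = acc + l.count c := by
  induction fuel with
  | zero =>
    intro l acc h
    have : l = [] := List.eq_nil_of_length_eq_zero (Nat.le_zero.1 h)
    simp [this, PySem.Chars.count.go]
  | succ n ih =>
    intro l acc h
    cases l with
    | nil => simp [PySem.Chars.count.go]
    | cons x t =>
      simp only [List.length_cons, Nat.succ_le_succ_iff] at h
      simp only [PySem.Chars.count.go, List.isPrefixOf, Bool.and_true, List.length_singleton,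
        List.drop_one, List.tail_cons]
      by_cases hc : c == x
      · rw [if_pos (by simp [hc]), ih t (acc + 1) h, List.count_cons]
        have hcx : c = x := (beq_iff_eq).1 hc
        subst hcx
        simp
        omega
      · rw [if_neg (by simp_all), ih t acc h, List.count_cons]
        have : ¬ (x == c) := by simp at hc ⊢; exact fun e => hc e.symm
        simp [this]

theorem pv_count_single (c : Char) (l : List Char) : PySem.Chars.count l [c] = l.count c := by
  simpa using pv_count_go_single c l.length l 0 le_rfl

-- equal lengths + equal counts on a's own characters ⇒ permutation
theorem pv_perm_of_counts (a b : List Char) (hl : a.length = b.length)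
    (hc : ∀ c ∈ a, a.count c = b.count c) : a.Perm b := by
  rw [← Multiset.coe_eq_coe]
  refine Multiset.eq_of_le_of_card_le ?_ ?_
  · rw [Multiset.le_iff_count]
    intro c
    by_cases h : c ∈ a
    · simp [hc c h]
    · simp [List.count_eq_zero_of_not_mem h]
  · simpa using hl.ge

-- B's count-based anagram test agrees with A's sorted-signature equality
theorem pv_anagrams_iff_canon (a b : String) :
    pvAnagrams a b = true ↔ pvCanon a = pvCanon b := by
  unfold pvAnagrams pvCanon
  rw [PySem.List.sorted_id_eq_sorted_id_iff_perm]
  simp only [Bool.and_eq_true, beq_iff_eq, List.all_eq_true, PySem.Str.len, pv_count_single,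
    Nat.cast_inj]
  constructor
  · rintro ⟨hl, hc⟩
    exact pv_perm_of_counts _ _ hl hc
  · intro hp
    exact ⟨hp.length_eq, fun c _ => hp.count_eq c⟩

-- A's loop returns true iff no canon is already seen and the canons are pairwise distinct
theorem pv_goA_iff (ws : List String) (seen : List (List Char)) :
    pvGoA ws seen = true ↔
      (∀ w ∈ ws, pvCanon w ∉ seen) ∧ ws.Pairwise (fun a b => pvCanon a ≠ pvCanon b) := by
  induction ws generalizing seen with
  | nil => simp [pvGoA]
  | cons w rest ih =>
    simp only [pvGoA]
    by_cases h : pvCanon w ∈ seen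
    · simp only [h, if_true]
      constructor
      · intro hfalse; cases hfalse
      · rintro ⟨hni, _⟩; exact absurd h (hni w (List.mem_cons_self))
    · simp only [h, if_false, ih, List.pairwise_cons, List.mem_cons, List.mem_append]
      constructor
      · rintro ⟨hni, hpw⟩
        refine ⟨?_, ⟨fun v hv => ?_, hpw⟩⟩
        · rintro x (rfl | hx)
          · exact h
          · intro hc
            exact (hni x hx) (by simp [hc])
        · intro hc
          exact (hni v hv) (by simp [hc.symm])
      · rintro ⟨hni, hhd, hpw⟩
        refine ⟨fun v hv hmem => ?_, hpw⟩
        rcases (by simpa using hmem : pvCanon v ∈ seen ∨ pvCanon v = pvCanon w) with hv1 | hv2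
        · exact (hni v (Or.inr hv)) hv1
        · exact (hhd v hv) hv2.symm

-- B's recursion returns true iff the canons (= anagram classes) are pairwise distinct
theorem pv_check_iff (ws : List String) :
    pvCheck ws = true ↔ ws.Pairwise (fun a b => pvCanon a ≠ pvCanon b) := by
  induction ws with
  | nil => simp [pvCheck]
  | cons w rest ih =>
    simp only [pvCheck, List.pairwise_cons]
    cases hany : rest.any (fun v => pvAnagrams w v) with
    | true =>
      simp only [if_true]
      rcases List.any_eq_true.1 hany with ⟨v, hv, hav⟩
      constructor
      · intro hfalse; cases hfalse
      · rintro ⟨hhd, _⟩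
        exact ((hhd v hv) ((pv_anagrams_iff_canon w v).1 hav)).elim
    | false =>
      rw [if_neg (by simp), ih]
      have hall : ∀ v ∈ rest, pvCanon w ≠ pvCanon v := by
        intro v hv hc
        have : pvAnagrams w v = true := (pv_anagrams_iff_canon w v).2 hc
        exact absurd (List.any_eq_true.2 ⟨v, hv, by simpa using this⟩) (by simp [hany])
      exact ⟨fun hpw => ⟨hall, hpw⟩, fun h => h.2⟩

-- ===== VERDICT (by name: the statement is the Claim_ definition above) =====
theorem is_anagram_password_spec : Claim_equal_is_anagram_password := by
  intro password _
  unfold Spec_is_anagram_password is_anagram_password is_anagram_password_alt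
  rw [Bool.eq_iff_iff, pv_goA_iff, pv_check_iff]
  exact ⟨fun h => h.2, fun hpw => ⟨fun w _ hw => (List.not_mem_nil hw : False), hpw⟩⟩
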